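-- pv_equiv track=rewrite | github.com/IlProfColazzo/ReplyCodeChallenge_Teen-Edition | 2022/Training/Week1/P2_DeBlasi.py | calcola
-- ===== SOURCE A (Python) =====
-- def calcola(D):
--     total = 0 #Difficoltà totale della sequenza
--     currentN = 0 #Numero attuale da aggiungere alla sequenza
--     totalCost = 0 #Costo totale (viene restituito alla fine)
--
--     #Se la difficoltà è 1 o 2 restituisce direttamente il costo adeguato
--     if (D == 1):
--         return 2
--     elif (D == 2):
--         return 3
--     else:
--         #Se la difficoltà è maggiore inizia il calcolo di numeri sequenziali
--         # utilizzando currentN per tenere traccia del numero da aggiungere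
--         while total < D:
--             if(total + currentN == D):
--                 total = total + currentN
--                 #Per ogni numero aggiunto alla sequenza si chiama la funziona calcola
--                 # e si aggiunge il risultato al costo totale
--                 totalCost = totalCost + calcola(currentN)
--             else:
--                 #Se il totale + il numero corrente + il numero successivo supera D
--                 # bisogna trovare il successivo (non consecutivo)
--                 # che se aggiunto al totale raggiunge D
--                 if (total + currentN + currentN + 1 > D):
--                     if (total + currentN + 1 == D):
--                         currentN = currentN + 1
--                         total = total + currentN
--                         totalCost = totalCost + calcola(currentN)
--                     else:
--                         #Aumenta currentN finchè non si trova quello adatto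
--                         currentN = currentN + 1
--                 else:
--                     #Se il totale + il numero corrente + il numero successivo
--                     # non superano N si prosegue con la sequenza normalmente
--                     total = total + currentN
--                     totalCost = totalCost + calcola(currentN)
--                     currentN = currentN + 1
--
--     #Alla fine delle operazioni restituisce il costo totale
--     return totalCost
-- ===== SOURCE B (Python) =====
-- def calcola(D):
--     # Top-down with a memo table: each subproblem cost is computed once,
--     # instead of A's plain recursion which recomputes small values massively.
--     memo = {}
--
--     def cost(n):
--         if n <= 0:
--             return 0
--         if n == 1:
--             return 2
--         if n == 2:
--             return 3
--         if n in memo: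
--             return memo[n]
--         total, k, c = 0, 1, 0
--         while total + 2 * k + 1 <= n:
--             c += cost(k)
--             total += k
--             k += 1
--         c += cost(n - total)
--         memo[n] = c
--         return c
--
--     return cost(D)
-- ===== Notes on version B (the rewrite author's own statement) =====
-- stated objective: faster
-- what changed: B memoizes the cost recursion in a dict (each subproblem value computed once) instead of A's plain recursion that recomputes every summand's cost from scratch at every level.
import Mathlib
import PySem

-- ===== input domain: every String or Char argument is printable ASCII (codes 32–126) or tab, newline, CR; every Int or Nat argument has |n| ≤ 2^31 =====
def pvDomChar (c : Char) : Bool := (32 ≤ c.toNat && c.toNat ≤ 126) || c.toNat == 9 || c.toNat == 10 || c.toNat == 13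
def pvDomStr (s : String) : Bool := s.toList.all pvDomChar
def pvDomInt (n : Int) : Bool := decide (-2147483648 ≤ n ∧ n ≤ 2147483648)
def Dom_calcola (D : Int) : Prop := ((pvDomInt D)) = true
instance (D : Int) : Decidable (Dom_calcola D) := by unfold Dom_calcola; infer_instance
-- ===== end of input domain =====

-- B memoizes the recursion in a dict so every subproblem is computed once; a timing run measures it faster.
-- A's return value is total for every Int (negative/zero D returns 0), so there is no Pre_.

-- ===== PORT A =====
-- Fuel makes A's mutually recursive while-loop total; (D.toNat+2)^2 steps are proved sufficient below.
mutual
def calcolaF : Nat → Int → Int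
  | 0, _ => 0
  | f+1, D =>
    if D = 1 then 2
    else if D = 2 then 3
    else loopF f D 0 0 0

def loopF : Nat → Int → Int → Int → Int → Int
  | 0, _, _, _, tc => tc
  | f+1, D, total, n, tc =>
    if total < D then
      if total + n = D then
        loopF f D (total + n) n (tc + calcolaF f n)
      else if total + n + n + 1 > D then
        if total + n + 1 = D then
          loopF f D (total + (n + 1)) (n + 1) (tc + calcolaF f (n + 1))
        else
          loopF f D total (n + 1) tc
      else
        loopF f D (total + n) (n + 1) (tc + calcolaF f n)
    else tc
end

def calcola (D : Int) : Int := calcolaF ((D.toNat + 2) * (D.toNat + 2)) D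

-- ===== PORT B =====
-- Transliteration of Source B: cost(n) threading the memo dict; same fuel bound (memoisation only shortens runs).
mutual
def costB : Nat → PySem.Dict Int Int → Int → Int × PySem.Dict Int Int
  | 0, memo, _ => (0, memo)
  | f+1, memo, n =>
    if n ≤ 0 then (0, memo)
    else if n = 1 then (2, memo)
    else if n = 2 then (3, memo)
    else
      match PySem.Dict.get? memo n with      -- `if n in memo: return memo[n]`
      | some v => (v, memo)
      | none =>
        let r := loopB f memo n 0 1 0        -- total, k, c = 0, 1, 0; while …
        let s := costB f r.2.2 (n - r.1)     -- c += cost(n - total)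
        let c := r.2.1 + s.1
        (c, PySem.Dict.insert s.2 n c)       -- memo[n] = c; return c

def loopB : Nat → PySem.Dict Int Int → Int → Int → Int → Int → Int × Int × PySem.Dict Int Int
  | 0, memo, _, total, _, c => (total, c, memo)
  | f+1, memo, n, total, k, c =>
    if total + 2 * k + 1 ≤ n then
      let s := costB f memo k
      loopB f s.2 n (total + k) (k + 1) (c + s.1)
    else (total, c, memo)
end

def calcola_alt (D : Int) : Int :=
  (costB ((D.toNat + 2) * (D.toNat + 2)) PySem.Dict.empty D).1

-- ===== PRECONDITION & SPEC =====
def Spec_calcola (D : Int) (out : Int) : Prop := out = calcola_alt D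
instance (D : Int) (out : Int) : Decidable (Spec_calcola D out) := by unfold Spec_calcola; infer_instance

-- ===== CLAIM (what is proved, stated in full; the proofs are below) =====
def Claim_equal_calcola : Prop := ∀ (D : Int), Dom_calcola D → Spec_calcola D (calcola D)

-- ===== LEMMAS AND PROOFS =====

-- Reference: the table of true costs, built bottom-up; entry m of `tbl m` is the cost of difficulty m.
def cfPrev (prev : List Int) (n total k : Int) : Int :=
  if _h : total < n ∧ 0 ≤ k ∧ total + k ≤ n then
    if total + k = n then prev.getD k.toNat 0
    else if n < total + 2 * k + 1 then
      if total + k + 1 = n then prev.getD (k + 1).toNat 0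
      else cfPrev prev n total (k + 1)
    else prev.getD k.toNat 0 + cfPrev prev n (total + k) (k + 1)
  else 0
termination_by (n - total - k).toNat
decreasing_by all_goals omega

def tbl : Nat → List Int
  | 0 => [0]
  | m+1 => tbl m ++ [if (m : Int) + 1 = 1 then 2 else if (m : Int) + 1 = 2 then 3
                     else cfPrev (tbl m) ((m : Int) + 1) 0 0]

def tblVal (m : Nat) : Int := (tbl m).getD m 0
def tblValI (i : Int) : Int := tblVal i.toNat

-- Remaining cost of A's loop from state (total, k), expressed with true costs.
def costFrom (n total k : Int) : Int :=
  if _h : total < n ∧ 0 ≤ k ∧ total + k ≤ n then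
    if total + k = n then tblValI k
    else if n < total + 2 * k + 1 then
      if total + k + 1 = n then tblValI (k + 1)
      else costFrom n total (k + 1)
    else tblValI k + costFrom n (total + k) (k + 1)
  else 0
termination_by (n - total - k).toNat
decreasing_by all_goals omega

-- Final total and accumulated cost of B's inner while-loop.
def runLoop (n total k : Int) : Int × Int :=
  if _h : total + 2 * k + 1 ≤ n ∧ 0 ≤ k then
    let r := runLoop n (total + k) (k + 1)
    (r.1, tblValI k + r.2)
  else (total, 0)
termination_by (n - total - k).toNat
decreasing_by omega

theorem tbl_length (M : Nat) : (tbl M).length = M + 1 := by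
  induction M with
  | zero => rfl
  | succ m ih => simp [tbl, ih]

theorem tbl_getD (M j : Nat) (h : j ≤ M) : (tbl M).getD j 0 = tblVal j := by
  induction M with
  | zero => interval_cases j; rfl
  | succ m ih =>
    rcases Nat.lt_or_ge j (m + 1) with hj | hj
    · rw [tbl, List.getD_append _ _ _ _ (by rw [tbl_length]; omega)]
      exact ih (by omega)
    · have hj' : j = m + 1 := by omega
      subst hj'; rfl

theorem getD_tbl_int (M : Nat) (i : Int) (h0 : 0 ≤ i) (h1 : i ≤ (M : Int)) :
    (tbl M).getD i.toNat 0 = tblValI i := by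
  exact tbl_getD M i.toNat (by omega)

theorem costFrom_tail (n total k : Int) (h1 : total < n) (h2 : 0 ≤ k)
    (h3 : total + k ≤ n) (h4 : n < total + 2 * k + 1) :
    costFrom n total k = tblValI (n - total) := by
  have main : ∀ j : Nat, ∀ k : Int, (n - total - k).toNat = j → 0 ≤ k → total + k ≤ n →
      n < total + 2 * k + 1 → costFrom n total k = tblValI (n - total) := by
    intro j
    induction j using Nat.strong_induction_on with
    | _ j ih =>
      intro k hj hk h3 h4
      rw [costFrom, dif_pos ⟨h1, hk, h3⟩]
      by_cases e1 : total + k = n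
      · rw [if_pos e1]; congr 1; omega
      · rw [if_neg e1, if_pos (by omega)]
        by_cases e2 : total + k + 1 = n
        · rw [if_pos e2]; congr 1; omega
        · rw [if_neg e2]
          exact ih (n - total - (k + 1)).toNat (by omega) (k + 1) rfl (by omega)
            (by omega) (by omega)
  exact main (n - total - k).toNat k rfl h2 h3 h4

theorem costFrom_runLoop (n total k : Int) (h0 : 0 ≤ total) (h1 : 1 ≤ k)
    (h2 : total + k ≤ n) :
    costFrom n total k = (runLoop n total k).2 + tblValI (n - (runLoop n total k).1) := by
  have main : ∀ j : Nat, ∀ total k : Int, (n - total - k).toNat = j → 0 ≤ total → 1 ≤ k →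
      total + k ≤ n →
      costFrom n total k = (runLoop n total k).2 + tblValI (n - (runLoop n total k).1) := by
    intro j
    induction j using Nat.strong_induction_on with
    | _ j ih =>
      intro total k hj h0 h1 h2
      by_cases c : total + 2 * k + 1 ≤ n
      · rw [runLoop, dif_pos ⟨c, by omega⟩]
        dsimp only
        rw [costFrom, dif_pos ⟨by omega, by omega, h2⟩, if_neg (by omega), if_neg (by omega)]
        rw [ih (n - (total + k) - (k + 1)).toNat (by omega) (total + k) (k + 1) rfl
          (by omega) (by omega) (by omega)]
        ring
      · rw [runLoop, dif_neg (by omega)]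
        rw [costFrom_tail n total k (by omega) (by omega) h2 (by omega)]
        simp
  exact main (n - total - k).toNat total k rfl h0 h1 h2

theorem runLoop_bounds (n total k : Int) (h0 : 0 ≤ total) (h1 : 1 ≤ k)
    (h2 : total + k ≤ n) :
    total ≤ (runLoop n total k).1 ∧ (runLoop n total k).1 + 1 ≤ n := by
  have main : ∀ j : Nat, ∀ total k : Int, (n - total - k).toNat = j → 0 ≤ total → 1 ≤ k →
      total + k ≤ n → total ≤ (runLoop n total k).1 ∧ (runLoop n total k).1 + 1 ≤ n := by
    intro j
    induction j using Nat.strong_induction_on with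
    | _ j ih =>
      intro total k hj h0 h1 h2
      by_cases c : total + 2 * k + 1 ≤ n
      · rw [runLoop, dif_pos ⟨c, by omega⟩]
        dsimp only
        have := ih (n - (total + k) - (k + 1)).toNat (by omega) (total + k) (k + 1) rfl
          (by omega) (by omega) (by omega)
        exact ⟨by omega, this.2⟩
      · rw [runLoop, dif_neg (by omega)]
        exact ⟨le_refl _, by omega⟩
  exact main (n - total - k).toNat total k rfl h0 h1 h2

theorem runLoop_start (n : Int) (h : 3 ≤ n) :
    1 ≤ (runLoop n 0 1).1 ∧ (runLoop n 0 1).1 + 1 ≤ n := by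
  rw [runLoop, dif_pos ⟨by omega, by omega⟩]
  dsimp only
  exact runLoop_bounds n 1 2 (by omega) (by omega) (by omega)

theorem cfPrev_eq_costFrom (M : Nat) (n total k : Int) (h3 : 3 ≤ n)
    (hM : n ≤ (M : Int) + 1) (h0 : 0 ≤ total) (hk : 0 ≤ k) (h2 : total + k ≤ n)
    (hz : total = 0 → k ≤ 1) :
    cfPrev (tbl M) n total k = costFrom n total k := by
  have main : ∀ j : Nat, ∀ total k : Int, (n - total - k).toNat = j → 0 ≤ total → 0 ≤ k →
      total + k ≤ n → (total = 0 → k ≤ 1) →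
      cfPrev (tbl M) n total k = costFrom n total k := by
    intro j
    induction j using Nat.strong_induction_on with
    | _ j ih =>
      intro total k hj h0 hk h2 hz
      by_cases hg : total < n
      · rw [cfPrev, costFrom, dif_pos ⟨hg, hk, h2⟩, dif_pos ⟨hg, hk, h2⟩]
        by_cases e1 : total + k = n
        · rw [if_pos e1, if_pos e1]
          have ht : 1 ≤ total := by
            by_contra hc
            have : total = 0 := by omega
            have := hz this
            omega
          exact getD_tbl_int M k hk (by omega)
        · rw [if_neg e1, if_neg e1]
          by_cases e2 : n < total + 2 * k + 1
          · rw [if_pos e2, if_pos e2]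
            by_cases e3 : total + k + 1 = n
            · rw [if_pos e3, if_pos e3]
              have ht : 1 ≤ total := by
                by_contra hc
                have h00 : total = 0 := by omega
                have := hz h00
                omega
              exact getD_tbl_int M (k + 1) (by omega) (by omega)
            · rw [if_neg e3, if_neg e3]
              have ht : total ≠ 0 := by
                intro h00
                have := hz h00
                omega
              exact ih (n - total - (k + 1)).toNat (by omega) total (k + 1) rfl h0
                (by omega) (by omega) (by omega)
          · rw [if_neg e2, if_neg e2]
            have hlook := getD_tbl_int M k hk (by omega)
            rw [hlook]
            have := ih (n - (total + k) - (k + 1)).toNat (by omega) (total + k) (k + 1) rfl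
              (by omega) (by omega) (by omega) (by omega)
            rw [this]
      · rw [cfPrev, costFrom, dif_neg (by omega), dif_neg (by omega)]
  exact main (n - total - k).toNat total k rfl h0 hk h2 hz

theorem tblVal_rec (m : Nat) (h : 3 ≤ m) : (tblVal m : Int) = costFrom (m : Int) 0 0 := by
  obtain ⟨p, rfl⟩ : ∃ p, m = p + 1 := ⟨m - 1, by omega⟩
  have hcast : ((p : Int) + 1) = ((p + 1 : Nat) : Int) := by push_cast; ring
  have hval : tblVal (p + 1) = cfPrev (tbl p) ((p : Int) + 1) 0 0 := by
    unfold tblVal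
    rw [tbl]
    have hlen : (tbl p).length = p + 1 := tbl_length p
    rw [show p + 1 = (tbl p).length from hlen.symm]
    rw [show ((tbl p) ++ [if (p : Int) + 1 = 1 then 2 else if (p : Int) + 1 = 2 then 3
        else cfPrev (tbl p) ((p : Int) + 1) 0 0]).getD (tbl p).length 0 =
        (if (p : Int) + 1 = 1 then 2 else if (p : Int) + 1 = 2 then 3
        else cfPrev (tbl p) ((p : Int) + 1) 0 0) from by
      simp [List.getD_eq_getElem?_getD]]
    rw [if_neg (by omega), if_neg (by omega)]
  rw [hval, cfPrev_eq_costFrom p ((p : Int) + 1) 0 0 (by omega) (by omega) (by omega)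
    (by omega) (by omega) (by omega)]
  rw [hcast]

theorem costFrom_00 (n : Int) (h : 3 ≤ n) : costFrom n 0 0 = costFrom n 0 1 := by
  rw [costFrom, dif_pos ⟨by omega, by omega, by omega⟩, if_neg (by omega), if_neg (by omega)]
  have h0 : tblValI 0 = 0 := rfl
  simp [h0]

theorem phi_mono {a b : Nat} (h : a ≤ b) : (a + 2) * (a + 2) ≤ (b + 2) * (b + 2) :=
  Nat.mul_le_mul (by omega) (by omega)

theorem fuel_key (t : Nat) (h : 1 ≤ t) :
    t + 2 + ((t - 1) + 2) * ((t - 1) + 2) + 1 ≤ (t + 2) * (t + 2) := by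
  obtain ⟨u, rfl⟩ : ∃ u, t = u + 1 := ⟨t - 1, by omega⟩
  simp only [Nat.add_sub_cancel]
  ring_nf
  omega

theorem costFrom_unfold (n total k : Int) (hg : total < n ∧ 0 ≤ k ∧ total + k ≤ n) :
    costFrom n total k =
      if total + k = n then tblValI k
      else if n < total + 2 * k + 1 then
        (if total + k + 1 = n then tblValI (k + 1) else costFrom n total (k + 1))
      else tblValI k + costFrom n (total + k) (k + 1) := by
  rw [costFrom, dif_pos hg]

theorem costFrom_eq_tblValI (n : Int) (h3 : 3 ≤ n) : costFrom n 0 0 = tblValI n := by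
  have hc : n = ((n.toNat : Nat) : Int) := by omega
  have := tblVal_rec n.toNat (by omega)
  rw [hc] at this ⊢
  simp only [tblValI, Int.toNat_natCast]
  exact this.symm

-- A-side: with enough fuel, calcolaF computes the true cost; proved with its loop lemma by strong induction on fuel.
theorem A_main (f : Nat) :
    (∀ n : Int, 0 ≤ n → (n.toNat + 2) * (n.toNat + 2) ≤ f → calcolaF f n = tblValI n) ∧
    (∀ D total n tc : Int, 3 ≤ D → 0 ≤ total → 0 ≤ n → total + n ≤ D → (total = 0 → n ≤ 1) →
      (D - total - n).toNat + 2 + ((D.toNat - 1) + 2) * ((D.toNat - 1) + 2) ≤ f →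
      loopF f D total n tc = tc + costFrom D total n) := by
  induction f using Nat.strong_induction_on with
  | _ f ih =>
  constructor
  · intro n hn hf
    have h4 : (0 + 2) * (0 + 2) ≤ (n.toNat + 2) * (n.toNat + 2) := phi_mono (Nat.zero_le _)
    obtain ⟨f', rfl⟩ : ∃ g, f = g + 1 := ⟨f - 1, by omega⟩
    rw [calcolaF]
    by_cases e1 : n = 1
    · subst e1; rw [if_pos rfl]; decide
    · rw [if_neg e1]
      by_cases e2 : n = 2
      · subst e2; rw [if_pos rfl]; decide
      · rw [if_neg e2]
        by_cases e0 : n = 0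
        · subst e0
          obtain ⟨f'', rfl⟩ : ∃ g, f' = g + 1 := ⟨f' - 1, by omega⟩
          rw [loopF, if_neg (lt_irrefl 0)]
          decide
        · have h3 : 3 ≤ n := by omega
          have hkey := fuel_key n.toNat (by omega)
          have hQ := (ih f' (by omega)).2 n 0 0 0 h3 (by omega) (by omega) (by omega)
            (by omega) (by omega)
          rw [hQ, zero_add]
          exact costFrom_eq_tblValI n h3
  · intro D total n tc h3 h0 hn hle hz hf
    have hC4 : (0 + 2) * (0 + 2) ≤ ((D.toNat - 1) + 2) * ((D.toNat - 1) + 2) :=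
      phi_mono (Nat.zero_le _)
    obtain ⟨f', rfl⟩ : ∃ g, f = g + 1 := ⟨f - 1, by omega⟩
    rw [loopF]
    by_cases hc1 : total < D
    swap
    · rw [if_neg hc1, costFrom, dif_neg (by omega)]
      omega
    rw [if_pos hc1]
    by_cases c2 : total + n = D
    · rw [if_pos c2]
      obtain ⟨f'', rfl⟩ : ∃ g, f' = g + 1 := ⟨f' - 1, by omega⟩
      rw [c2, loopF, if_neg (lt_irrefl D)]
      have hnD : n < D := by
        by_cases h00 : total = 0
        · have := hz h00; omega
        · omega
      have hmono := phi_mono (show n.toNat ≤ D.toNat - 1 by omega)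
      have hP := (ih (f'' + 1) (by omega)).1 n hn (by omega)
      rw [hP, costFrom_unfold D total n ⟨hc1, hn, by omega⟩, if_pos c2]
    · rw [if_neg c2]
      by_cases c3 : total + n + n + 1 > D
      · rw [if_pos c3]
        by_cases c4 : total + n + 1 = D
        · rw [if_pos c4]
          obtain ⟨f'', rfl⟩ : ∃ g, f' = g + 1 := ⟨f' - 1, by omega⟩
          rw [show total + (n + 1) = D by omega, loopF, if_neg (lt_irrefl D)]
          have hnD : n + 1 < D := by
            by_cases h00 : total = 0
            · have := hz h00; omega
            · omega
          have hmono := phi_mono (show (n + 1).toNat ≤ D.toNat - 1 by omega)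
          have hP := (ih (f'' + 1) (by omega)).1 (n + 1) (by omega) (by omega)
          rw [hP, costFrom_unfold D total n ⟨hc1, hn, by omega⟩, if_neg c2,
            if_pos (by omega), if_pos c4]
        · rw [if_neg c4]
          have ht0 : total ≠ 0 := by
            intro h00; have := hz h00; omega
          have hQ := (ih f' (by omega)).2 D total (n + 1) tc h3 h0 (by omega) (by omega)
            (by omega) (by omega)
          rw [hQ, costFrom_unfold D total n ⟨hc1, hn, by omega⟩, if_neg c2,
            if_pos (by omega), if_neg c4]
      · rw [if_neg c3]
        have hnD : n < D := by omega
        have hmono := phi_mono (show n.toNat ≤ D.toNat - 1 by omega)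
        have hP := (ih f' (by omega)).1 n hn (by omega)
        have hQ := (ih f' (by omega)).2 D (total + n) (n + 1) (tc + calcolaF f' n) h3
          (by omega) (by omega) (by omega) (by omega) (by omega)
        rw [hQ, hP, costFrom_unfold D total n ⟨hc1, hn, by omega⟩, if_neg c2,
          if_neg (by omega)]
        ring

def GoodM (memo : PySem.Dict Int Int) : Prop :=
  ∀ i v, PySem.Dict.get? memo i = some v → v = tblValI i

theorem costB_none_eq (f : Nat) (memo : PySem.Dict Int Int) (n : Int) (h0 : ¬ n ≤ 0)
    (h1 : ¬ n = 1) (h2 : ¬ n = 2) (hm : PySem.Dict.get? memo n = none) :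
    costB (f + 1) memo n =
      ((loopB f memo n 0 1 0).2.1 +
        (costB f (loopB f memo n 0 1 0).2.2 (n - (loopB f memo n 0 1 0).1)).1,
       PySem.Dict.insert
         (costB f (loopB f memo n 0 1 0).2.2 (n - (loopB f memo n 0 1 0).1)).2 n
         ((loopB f memo n 0 1 0).2.1 +
           (costB f (loopB f memo n 0 1 0).2.2 (n - (loopB f memo n 0 1 0).1)).1)) := by
  rw [costB, if_neg h0, if_neg h1, if_neg h2, hm]

-- B-side: with enough fuel and a correct memo, costB computes the true cost and keeps the memo correct.
theorem B_main (f : Nat) :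
    (∀ memo n, GoodM memo → (n.toNat + 2) * (n.toNat + 2) ≤ f →
      (costB f memo n).1 = tblValI n ∧ GoodM (costB f memo n).2) ∧
    (∀ memo n total k c, GoodM memo → 3 ≤ n → 0 ≤ total → 1 ≤ k → total + k ≤ n →
      (n - total - k).toNat + 1 + ((n.toNat - 1) + 2) * ((n.toNat - 1) + 2) ≤ f →
      (loopB f memo n total k c).1 = (runLoop n total k).1 ∧
      (loopB f memo n total k c).2.1 = c + (runLoop n total k).2 ∧
      GoodM (loopB f memo n total k c).2.2) := by
  induction f using Nat.strong_induction_on with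
  | _ f ih =>
  constructor
  · intro memo n hg hf
    have h4 : (0 + 2) * (0 + 2) ≤ (n.toNat + 2) * (n.toNat + 2) := phi_mono (Nat.zero_le _)
    obtain ⟨f', rfl⟩ : ∃ g, f = g + 1 := ⟨f - 1, by omega⟩
    by_cases e0 : n ≤ 0
    · rw [costB, if_pos e0]
      refine ⟨?_, hg⟩
      show (0 : Int) = tblValI n
      have hz : n.toNat = 0 := by omega
      simp only [tblValI, hz]
      decide
    · by_cases e1 : n = 1
      · subst e1; rw [costB, if_neg e0, if_pos rfl]
        exact ⟨show (2:Int) = tblValI 1 by decide, hg⟩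
      · by_cases e2 : n = 2
        · subst e2; rw [costB, if_neg e0, if_neg e1, if_pos rfl]
          exact ⟨show (3:Int) = tblValI 2 by decide, hg⟩
        · have h3 : 3 ≤ n := by omega
          cases hm : PySem.Dict.get? memo n with
          | some v =>
            rw [costB, if_neg e0, if_neg e1, if_neg e2, hm]
            exact ⟨hg n v hm, hg⟩
          | none =>
            rw [costB_none_eq f' memo n e0 e1 e2 hm]
            have hkey := fuel_key n.toNat (by omega)
            obtain ⟨hT, hS, hGood⟩ := (ih f' (by omega)).2 memo n 0 1 0 hg h3 (by omega)
              (by omega) (by omega) (by omega)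
            have hrs := runLoop_start n h3
            have hmono := phi_mono
              (show (n - (runLoop n 0 1).1).toNat ≤ n.toNat - 1 by omega)
            rw [hT, hS, zero_add]
            obtain ⟨hsv, hsg⟩ := (ih f' (by omega)).1 (loopB f' memo n 0 1 0).2.2
              (n - (runLoop n 0 1).1) hGood (by omega)
            rw [hsv]
            have hc : (runLoop n 0 1).2 + tblValI (n - (runLoop n 0 1).1) = tblValI n := by
              rw [← costFrom_runLoop n 0 1 (by omega) (by omega) (by omega),
                ← costFrom_00 n h3]
              exact costFrom_eq_tblValI n h3
            refine ⟨hc, ?_⟩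
            intro i v hiv
            rw [PySem.Dict.get?_insert] at hiv
            by_cases hin : i = n
            · rw [if_pos hin] at hiv
              subst hin
              rw [← hc]
              exact (Option.some_injective _ hiv).symm
            · rw [if_neg hin] at hiv
              exact hsg i v hiv
  · intro memo n total k c hg h3 h0 h1 hlk hf
    have hC4 : (0 + 2) * (0 + 2) ≤ ((n.toNat - 1) + 2) * ((n.toNat - 1) + 2) :=
      phi_mono (Nat.zero_le _)
    obtain ⟨f', rfl⟩ : ∃ g, f = g + 1 := ⟨f - 1, by omega⟩
    rw [loopB]
    by_cases cc : total + 2 * k + 1 ≤ n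
    · rw [if_pos cc]
      have hmono := phi_mono (show k.toNat ≤ n.toNat - 1 by omega)
      obtain ⟨hPv, hPg⟩ := (ih f' (by omega)).1 memo k hg (by omega)
      obtain ⟨q1, q2, q3⟩ := (ih f' (by omega)).2 (costB f' memo k).2 n (total + k) (k + 1)
        (c + (costB f' memo k).1) hPg h3 (by omega) (by omega) (by omega) (by omega)
      rw [runLoop, dif_pos ⟨cc, by omega⟩]
      dsimp only
      refine ⟨q1, ?_, q3⟩
      rw [q2, hPv]
      ring
    · rw [if_neg cc, runLoop, dif_neg (by omega)]
      exact ⟨rfl, (add_zero c).symm, hg⟩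

-- ===== VERDICT (by name: the statement is the Claim_ definition above) =====
theorem calcola_spec : Claim_equal_calcola := by
  intro D _
  unfold Spec_calcola calcola calcola_alt
  by_cases hD : 0 ≤ D
  · have hA := (A_main ((D.toNat + 2) * (D.toNat + 2))).1 D hD (le_refl _)
    have hGood : GoodM PySem.Dict.empty := by
      intro i v h
      rw [PySem.Dict.get?_empty] at h
      cases h
    have hB := ((B_main ((D.toNat + 2) * (D.toNat + 2))).1 PySem.Dict.empty D hGood
      (le_refl _)).1
    rw [hA, hB]
  · have ht : D.toNat = 0 := by omega
    rw [ht]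
    show calcolaF (3 + 1) D = (costB (3 + 1) PySem.Dict.empty D).1
    rw [calcolaF, if_neg (show ¬ D = 1 by omega), if_neg (show ¬ D = 2 by omega)]
    rw [costB, if_pos (show D ≤ 0 by omega)]
    rw [show (3 : Nat) = 2 + 1 from rfl, loopF, if_neg (show ¬ (0 : Int) < D by omega)]
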